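-- pv_equiv track=rewrite | github.com/vhogemann/log_notebook | flowchart.py | format_stacktrace
-- ===== SOURCE A (Python) =====
-- def format_stacktrace(message: str) -> str:
--     stacktrace = []
--     for line in message.split("\n"):
--         if line.strip().startswith("at "):
--             if "com.starlingbank" in line:
--                 stacktrace.append(line)
--             elif len(stacktrace) > 0 and stacktrace[-1] != "...":
--                 stacktrace.append("...")
--         else:
--             stacktrace.append(line)
--     return "\n".join(stacktrace)
-- ===== SOURCE B (Python) =====
-- def _keep(line):
--     return not (line.strip().startswith("at ") and "com.starlingbank" not in line)
--
-- def format_stacktrace(message: str) -> str: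
--     lines = message.split("\n")
--     # phase 1: group consecutive lines into runs with equal keep/collapse key
--     groups = []
--     i = 0
--     while i < len(lines):
--         k = _keep(lines[i])
--         j = i + 1
--         while j < len(lines) and _keep(lines[j]) == k:
--             j += 1
--         groups.append((k, lines[i:j]))
--         i = j
--     # phase 2: emit kept runs verbatim, each collapse run as one "..." marker
--     out = []
--     for k, run in groups:
--         if k:
--             out.extend(run)
--         elif out and out[-1] != "...":
--             out.append("...")
--     return "\n".join(out)
-- ===== Notes on version B (the rewrite author's own statement) =====
-- stated objective: alternative
-- what changed: B replaces A's single interleaved accumulator loop by a two-phase group-then-emit pass: lines are first grouped into maximal consecutive keep/collapse runs, then kept runs are emitted verbatim and each collapse run becomes at most one ellipsis marker.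
import Mathlib
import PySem

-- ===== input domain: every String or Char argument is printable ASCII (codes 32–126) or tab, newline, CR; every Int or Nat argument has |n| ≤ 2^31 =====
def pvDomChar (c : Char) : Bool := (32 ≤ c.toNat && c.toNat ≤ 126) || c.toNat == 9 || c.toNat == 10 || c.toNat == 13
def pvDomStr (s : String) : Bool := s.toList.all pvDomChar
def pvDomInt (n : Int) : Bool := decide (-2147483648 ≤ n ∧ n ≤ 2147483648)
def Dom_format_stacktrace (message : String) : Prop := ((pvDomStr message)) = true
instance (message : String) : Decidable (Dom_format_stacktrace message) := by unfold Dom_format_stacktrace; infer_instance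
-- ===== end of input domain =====

-- B groups consecutive lines into keep/collapse runs first and then emits them in a second pass
-- (alternative decomposition, same cost); A interleaves the decision with a single accumulator loop.

-- ===== PORT A =====
-- one iteration of A's loop body (stacktrace[-1] is guarded by len > 0, so pyGet? is exact here)
def pvStepA (st : List String) (line : String) : List String :=
  if PySem.Str.startswith (PySem.Str.strip line) "at " then
    if PySem.Str.isIn "com.starlingbank" line then st ++ [line]
    else if decide (0 < st.length) && (PySem.List.pyGet? st (-1) != some "...") then st ++ ["..."]
    else st
  else st ++ [line]

-- split? "\n" is exact: the separator is nonempty, so Python's split never raises (getD is never taken)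
def format_stacktrace (message : String) : String :=
  PySem.Str.join "\n" (((PySem.Str.split? message "\n").getD []).foldl pvStepA [])

-- ===== PORT B =====
def pvKeep (line : String) : Bool :=
  !(PySem.Str.startswith (PySem.Str.strip line) "at " && !PySem.Str.isIn "com.starlingbank" line)

-- phase 1 of B: maximal consecutive runs with equal pvKeep key
def pvRuns : List String → List (Bool × List String)
  | [] => []
  | l :: ls =>
    (pvKeep l, l :: ls.takeWhile (fun x => pvKeep x == pvKeep l)) ::
      pvRuns (ls.dropWhile (fun x => pvKeep x == pvKeep l))
  termination_by ls => ls.length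
  decreasing_by
    simpa using Nat.lt_succ_of_le (List.length_dropWhile_le _ _)

-- phase 2 of B: emit kept runs verbatim, one "..." per collapse run
def pvEmit (out : List String) : List (Bool × List String) → List String
  | [] => out
  | (k, _run) :: gs =>
    if k then pvEmit (out ++ _run) gs
    else if !out.isEmpty && (out.getLast? != some "...") then pvEmit (out ++ ["..."]) gs
    else pvEmit out gs

def format_stacktrace_alt (message : String) : String :=
  PySem.Str.join "\n" (pvEmit [] (pvRuns ((PySem.Str.split? message "\n").getD [])))

-- ===== PRECONDITION & SPEC =====
def Spec_format_stacktrace (message : String) (out : String) : Prop := out = format_stacktrace_alt message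
instance (message : String) (out : String) : Decidable (Spec_format_stacktrace message out) := by unfold Spec_format_stacktrace; infer_instance

-- ===== CLAIM (what is proved, stated in full; the proofs are below) =====
def Claim_equal_format_stacktrace : Prop := ∀ (message : String), Dom_format_stacktrace message → Spec_format_stacktrace message (format_stacktrace message)

-- ===== LEMMAS AND PROOFS =====

-- A's guard `stacktrace[-1]` is B's getLast?
theorem pvNegOne_eq_getLast? (st : List String) (h : st ≠ []) :
    PySem.List.pyGet? st (-1) = st.getLast? := by
  have h1 : 1 ≤ st.length := List.length_pos_iff.mpr h
  simp [PySem.List.pyGet?, PySem.List.pyIdx?, List.getLast?_eq_getElem?, h1]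

-- a step on a kept line appends it
theorem pvStepA_keep (st : List String) (l : String) (h : pvKeep l = true) :
    pvStepA st l = st ++ [l] := by
  unfold pvKeep at h
  unfold pvStepA
  simp only [Bool.not_eq_true', Bool.and_eq_false_iff] at h
  rcases h with hs | hin
  · rw [hs]
    simp
  · rw [Bool.not_eq_false'] at hin
    by_cases hs : PySem.Str.startswith (PySem.Str.strip l) "at " = true
    · rw [hs, hin]
      simp
    · rw [Bool.eq_false_iff.mpr hs]
      simp

-- a step on a collapse line when the accumulator is empty or ends in "..." is a no-op
theorem pvStepA_skip (st : List String) (l : String) (h : pvKeep l = false)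
    (hout : st = [] ∨ st.getLast? = some "...") :
    pvStepA st l = st := by
  unfold pvKeep at h
  simp only [Bool.not_eq_false', Bool.and_eq_true, Bool.not_eq_true'] at h
  unfold pvStepA
  rw [h.1]
  simp only [h.2]
  rcases hout with h0 | h0
  · simp [h0]
  · have hne : st ≠ [] := by rintro rfl; simp at h0
    rw [pvNegOne_eq_getLast? st hne, h0]
    simp

-- a step on a collapse line when the accumulator is nonempty and does not end in "..." adds the marker
theorem pvStepA_mark (st : List String) (l : String) (h : pvKeep l = false)
    (hne : st ≠ []) (hlast : st.getLast? ≠ some "...") :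
    pvStepA st l = st ++ ["..."] := by
  unfold pvKeep at h
  simp only [Bool.not_eq_false', Bool.and_eq_true, Bool.not_eq_true'] at h
  unfold pvStepA
  rw [h.1]
  simp only [h.2]
  rw [pvNegOne_eq_getLast? st hne]
  have h1 : 0 < st.length := List.length_pos_iff.mpr hne
  simp [h1, hlast]

-- folding A's step over an all-kept run appends the run
theorem pvFoldA_keep (run : List String) (st : List String)
    (h : ∀ x ∈ run, pvKeep x = true) :
    run.foldl pvStepA st = st ++ run := by
  induction run generalizing st with
  | nil => simp
  | cons a t ih =>
    simp only [List.foldl_cons]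
    rw [pvStepA_keep st a (h a (by simp)), ih _ (fun x hx => h x (by simp [hx]))]
    simp

-- the no-op tail of a collapse run
theorem pvFoldA_skip (run : List String) (st : List String)
    (h : ∀ x ∈ run, pvKeep x = false) (hout : st = [] ∨ st.getLast? = some "...") :
    run.foldl pvStepA st = st := by
  induction run generalizing st with
  | nil => simp
  | cons a t ih =>
    simp only [List.foldl_cons]
    rw [pvStepA_skip st a (h a (by simp)) hout]
    exact ih st (fun x hx => h x (by simp [hx])) hout

-- folding A's step over a nonempty all-collapse run equals B's single-marker emission step
theorem pvFoldA_collapse (run : List String) (st : List String)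
    (h : ∀ x ∈ run, pvKeep x = false) (hne : run ≠ []) :
    run.foldl pvStepA st =
      (if !st.isEmpty && (st.getLast? != some "...") then st ++ ["..."] else st) := by
  cases run with
  | nil => exact absurd rfl hne
  | cons a t =>
    simp only [List.foldl_cons]
    by_cases hc : (!st.isEmpty && (st.getLast? != some "...")) = true
    · simp only [Bool.and_eq_true, Bool.not_eq_true', bne_iff_ne] at hc
      have hsne : st ≠ [] := by
        intro h0; rw [h0] at hc; simp at hc
      rw [pvStepA_mark st a (h a (by simp)) hsne hc.2]
      rw [pvFoldA_skip t _ (fun x hx => h x (by simp [hx])) (Or.inr (by simp))]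
      simp [hc.1, hc.2]
    · have hout : st = [] ∨ st.getLast? = some "..." := by
        by_cases h0 : st = []
        · exact Or.inl h0
        · right
          simp only [Bool.and_eq_true, Bool.not_eq_true', bne_iff_ne, not_and, not_ne_iff] at hc
          exact hc (by simp [h0])
      rw [pvStepA_skip st a (h a (by simp)) hout]
      rw [pvFoldA_skip t st (fun x hx => h x (by simp [hx])) hout]
      simp [hc]

-- main invariant: A's fold equals B's group-then-emit, for every accumulator
theorem pvMain (lines : List String) : ∀ st : List String,
    lines.foldl pvStepA st = pvEmit st (pvRuns lines) := by
  induction lines using pvRuns.induct with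
  | case1 => intro st; simp [pvRuns, pvEmit]
  | case2 l ls ih =>
    intro st
    have hsplit : ls = ls.takeWhile (fun x => pvKeep x == pvKeep l) ++
        ls.dropWhile (fun x => pvKeep x == pvKeep l) :=
      (List.takeWhile_append_dropWhile).symm
    have hall : ∀ x ∈ l :: ls.takeWhile (fun x => pvKeep x == pvKeep l), pvKeep x = pvKeep l := by
      intro x hx
      rcases List.mem_cons.mp hx with rfl | hx
      · rfl
      · simpa using List.mem_takeWhile_imp hx
    rw [pvRuns]
    conv_lhs => rw [show l :: ls = (l :: ls.takeWhile (fun x => pvKeep x == pvKeep l)) ++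
        ls.dropWhile (fun x => pvKeep x == pvKeep l) by rw [List.cons_append, ← hsplit]]
    rw [List.foldl_append]
    rcases Bool.eq_false_or_eq_true (pvKeep l) with hk | hk <;>
      simp only [hk] at hall ih ⊢
    · rw [pvFoldA_keep _ st hall]
      rw [pvEmit, if_pos rfl]
      exact ih _
    · rw [pvFoldA_collapse _ st hall (by simp)]
      rw [pvEmit]
      simp only [Bool.false_eq_true, if_false]
      by_cases hc : (!st.isEmpty && (st.getLast? != some "...")) = true
      · rw [if_pos hc, if_pos hc]; exact ih _
      · rw [if_neg hc, if_neg hc]; exact ih _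

-- ===== VERDICT (by name: the statement is the Claim_ definition above) =====
theorem format_stacktrace_spec : Claim_equal_format_stacktrace := by
  intro message _
  unfold Spec_format_stacktrace format_stacktrace format_stacktrace_alt
  rw [pvMain]
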